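-- pv_equiv track=rewrite | github.com/ashiqxq/codes | math/gcd.py | pqinversepercentmod
-- ===== SOURCE A (Python) =====
-- def pqinversepercentmod(p, q):
--     mod = 1000000007
--     expo = 0
--     expo = mod - 2
--     while (expo):
--         if (expo & 1):
--             p = (p * q) % mod
--         q = (q * q) % mod
--         expo >>= 1
--
--     return p
-- ===== SOURCE B (Python) =====
-- def _power(base, exp, mod):
--     if exp == 0:
--         return 1
--     h = _power(base, exp // 2, mod)
--     h = (h * h) % mod
--     if exp & 1:
--         h = (h * base) % mod
--     return h
--
--
-- def pqinversepercentmod(p, q):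
--     mod = 1000000007
--     return (p * _power(q, mod - 2, mod)) % mod
-- ===== Notes on version B (the rewrite author's own statement) =====
-- stated objective: alternative
-- what changed: Replaces the iterative while/bit-shift binary-exponentiation loop that folds p in along the way with a recursive divide-and-conquer square-and-multiply helper, multiplying p by the computed inverse once at the end.
import Mathlib
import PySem

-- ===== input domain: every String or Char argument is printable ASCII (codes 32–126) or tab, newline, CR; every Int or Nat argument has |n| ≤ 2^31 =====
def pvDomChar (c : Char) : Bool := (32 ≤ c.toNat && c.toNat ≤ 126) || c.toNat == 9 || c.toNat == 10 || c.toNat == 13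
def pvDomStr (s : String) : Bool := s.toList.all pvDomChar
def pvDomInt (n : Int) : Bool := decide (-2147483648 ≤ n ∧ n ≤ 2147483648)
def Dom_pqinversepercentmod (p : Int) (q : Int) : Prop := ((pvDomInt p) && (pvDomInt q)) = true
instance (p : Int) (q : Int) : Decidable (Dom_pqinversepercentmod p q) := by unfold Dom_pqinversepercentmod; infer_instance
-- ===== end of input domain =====

-- B replaces A's iterative while/bit-shift loop (which folds p in along the way) by a
-- recursive square-and-multiply helper and one final multiply by p; objective: alternative.

-- ===== PORT A =====
-- A's while loop: expo is the nonnegative counter mod-2, halved each round.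
def pqLoopA (expo : Nat) (p : Int) (q : Int) : Int :=
  if expo = 0 then p
  else
    pqLoopA (expo / 2)
      (if expo % 2 = 1 then (p * q) % 1000000007 else p)
      ((q * q) % 1000000007)
decreasing_by exact Nat.div_lt_self (Nat.pos_of_ne_zero (by assumption)) (by omega)

def pqinversepercentmod (p : Int) (q : Int) : Int :=
  pqLoopA (1000000007 - 2) p q

-- ===== PORT B =====
-- recursive square-and-multiply (Source B's _power)
def pqPower (base : Int) (exp : Nat) (mod : Int) : Int :=
  if exp = 0 then 1
  else
    let h := pqPower base (exp / 2) mod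
    let h := (h * h) % mod
    if exp % 2 = 1 then (h * base) % mod else h
decreasing_by exact Nat.div_lt_self (Nat.pos_of_ne_zero (by assumption)) (by omega)

def pqinversepercentmod_alt (p : Int) (q : Int) : Int :=
  (p * pqPower q (1000000007 - 2) 1000000007) % 1000000007

-- ===== PRECONDITION & SPEC =====
def Spec_pqinversepercentmod (p : Int) (q : Int) (out : Int) : Prop := out = pqinversepercentmod_alt p q
instance (p : Int) (q : Int) (out : Int) : Decidable (Spec_pqinversepercentmod p q out) := by unfold Spec_pqinversepercentmod; infer_instance

-- ===== CLAIM (what is proved, stated in full; the proofs are below) =====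
def Claim_equal_pqinversepercentmod : Prop := ∀ (p : Int) (q : Int), Dom_pqinversepercentmod p q → Spec_pqinversepercentmod p q (pqinversepercentmod p q)

-- ===== LEMMAS AND PROOFS =====

theorem pq_ml (a b : Int) : (a % 1000000007 * b) % 1000000007 = (a * b) % 1000000007 := by
  rw [Int.mul_emod, Int.emod_emod_of_dvd _ dvd_rfl, ← Int.mul_emod]

theorem pq_mr (a b : Int) : (a * (b % 1000000007)) % 1000000007 = (a * b) % 1000000007 := by
  rw [Int.mul_emod, Int.emod_emod_of_dvd _ dvd_rfl, ← Int.mul_emod]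

theorem pq_pow (b : Int) (n : Nat) :
    (b % 1000000007) ^ n % 1000000007 = b ^ n % 1000000007 := by
  induction n with
  | zero => simp
  | succ n ih =>
      rw [pow_succ, pow_succ, Int.mul_emod, ih, Int.emod_emod_of_dvd _ dvd_rfl,
        ← Int.mul_emod]

theorem pqPower_eq (e : Nat) (b : Int) :
    pqPower b e 1000000007 = b ^ e % 1000000007 := by
  induction e using Nat.strong_induction_on with
  | _ e ih =>
    rw [pqPower]
    by_cases h0 : e = 0
    · simp [h0]
    · have ih2 := ih (e / 2) (Nat.div_lt_self (Nat.pos_of_ne_zero h0) (by omega))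
      simp only [h0, if_false, ih2]
      have hsq : (b ^ (e / 2) % 1000000007 * (b ^ (e / 2) % 1000000007)) % 1000000007
          = b ^ (e / 2 + e / 2) % 1000000007 := by
        rw [pq_ml, pq_mr, ← pow_add]
      by_cases hodd : e % 2 = 1
      · have he : e / 2 + e / 2 + 1 = e := by omega
        simp only [hodd, if_true, hsq]
        rw [pq_ml, ← pow_succ, he]
      · have he : e / 2 + e / 2 = e := by omega
        simp only [hodd, if_false, hsq, he]

theorem pqLoopA_eq (e : Nat) (p q : Int) (he : e ≠ 0) :
    pqLoopA e p q = (p * q ^ e) % 1000000007 := by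
  induction e using Nat.strong_induction_on generalizing p q with
  | _ e ih =>
    rw [pqLoopA]
    simp only [he, if_false]
    by_cases h2 : e / 2 = 0
    · have he1 : e = 1 := by omega
      subst he1
      simp [pqLoopA]
    · have hlt : e / 2 < e := Nat.div_lt_self (Nat.pos_of_ne_zero he) (by omega)
      have hexp : e / 2 + e / 2 = 2 * (e / 2) := by omega
      by_cases hodd : e % 2 = 1
      · have he' : e / 2 + e / 2 + 1 = e := by omega
        rw [if_pos hodd, ih (e / 2) hlt _ _ h2]
        calc ((p * q) % 1000000007 * ((q * q) % 1000000007) ^ (e / 2)) % 1000000007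
            = ((p * q) * ((q * q) % 1000000007) ^ (e / 2)) % 1000000007 := pq_ml _ _
          _ = ((p * q) % 1000000007 * (((q * q) % 1000000007) ^ (e / 2) % 1000000007)) % 1000000007 :=
              Int.mul_emod _ _ _
          _ = ((p * q) % 1000000007 * ((q * q) ^ (e / 2) % 1000000007)) % 1000000007 := by
              rw [pq_pow]
          _ = ((p * q) * (q * q) ^ (e / 2)) % 1000000007 := by rw [pq_ml, pq_mr]
          _ = (p * q ^ e) % 1000000007 := by
              rw [mul_pow, ← pow_add, mul_assoc, mul_comm q, ← pow_succ, he']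
      · have he' : e / 2 + e / 2 = e := by omega
        rw [if_neg hodd, ih (e / 2) hlt _ _ h2]
        calc (p * ((q * q) % 1000000007) ^ (e / 2)) % 1000000007
            = (p % 1000000007 * (((q * q) % 1000000007) ^ (e / 2) % 1000000007)) % 1000000007 :=
              Int.mul_emod _ _ _
          _ = (p % 1000000007 * ((q * q) ^ (e / 2) % 1000000007)) % 1000000007 := by
              rw [pq_pow]
          _ = (p * (q * q) ^ (e / 2)) % 1000000007 := by rw [pq_ml, pq_mr]
          _ = (p * q ^ e) % 1000000007 := by rw [mul_pow, ← pow_add, he']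

-- ===== VERDICT (by name: the statement is the Claim_ definition above) =====
theorem pqinversepercentmod_spec : Claim_equal_pqinversepercentmod := by
  intro p q _
  unfold Spec_pqinversepercentmod pqinversepercentmod pqinversepercentmod_alt
  rw [pqLoopA_eq _ _ _ (by norm_num), pqPower_eq, pq_mr]
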